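-- pv_equiv track=rewrite | github.com/raymond-w-ko/subvox | bin/agent-setup.py | _extract_project_sections
-- ===== SOURCE A (Python) =====
-- def _extract_project_sections(content: str) -> str:
--     """Extract [projects.*] sections from existing TOML content."""
--     lines = content.splitlines(keepends=True)
--     project_lines = []
--     in_project = False
--     for line in lines:
--         stripped = line.strip()
--         if stripped.startswith("[projects."):
--             in_project = True
--             project_lines.append(line)
--         elif stripped.startswith("[") and not stripped.startswith("[projects."):
--             in_project = False
--         elif in_project:
--             project_lines.append(line)
--     return "".join(project_lines)
-- ===== SOURCE B (Python) =====
-- def _extract_project_sections(content: str) -> str: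
--     """Extract [projects.*] sections from existing TOML content."""
--     blocks = []
--     cur = None
--     for line in content.splitlines(keepends=True):
--         if line.strip().startswith("["):
--             cur = [line]
--             blocks.append(cur)
--         elif cur is not None:
--             cur.append(line)
--     return "".join(
--         "".join(b) for b in blocks if b[0].strip().startswith("[projects.")
--     )
-- ===== Notes on version B (the rewrite author's own statement) =====
-- stated objective: alternative
-- what changed: B materialises the lines into header-led section blocks first and then filters/concatenates the blocks whose header starts with '[projects.', instead of A's per-line in_project flag deciding each line as it streams by.
import Mathlib
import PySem

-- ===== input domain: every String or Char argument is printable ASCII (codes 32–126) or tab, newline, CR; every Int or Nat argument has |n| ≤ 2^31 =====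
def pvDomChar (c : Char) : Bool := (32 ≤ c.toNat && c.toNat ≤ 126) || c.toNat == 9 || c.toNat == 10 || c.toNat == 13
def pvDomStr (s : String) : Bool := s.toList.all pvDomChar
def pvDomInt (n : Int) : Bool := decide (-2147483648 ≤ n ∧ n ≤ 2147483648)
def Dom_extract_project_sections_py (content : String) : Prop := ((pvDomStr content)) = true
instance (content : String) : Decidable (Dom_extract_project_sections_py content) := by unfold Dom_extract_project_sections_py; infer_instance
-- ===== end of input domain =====

-- B groups lines into header-led section blocks and then filters/concatenates the
-- [projects. blocks, instead of A's per-line in_project flag (objective: alternative).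


-- ===== PORT A =====
-- shared helper: str.splitlines(keepends=True), exact on the domain's line
-- terminators '\n', '\r', '\r\n' (no other splitlines terminator is in Dom_).
def pvSplitKeepends (cur : List Char) : List Char → List (List Char)
  | [] => if cur = [] then [] else [cur.reverse]
  | c :: rest =>
    if c = '\n' then (cur.reverse ++ ['\n']) :: pvSplitKeepends [] rest
    else if c = '\r' then
      if rest.head? = some '\n' then (cur.reverse ++ ['\r', '\n']) :: pvSplitKeepends [] rest.tail
      else (cur.reverse ++ ['\r']) :: pvSplitKeepends [] rest
    else pvSplitKeepends (c :: cur) rest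
  termination_by l => l.length
  decreasing_by all_goals (simp [List.length_tail]; try omega)

-- the body of A's for-loop, state = (project_lines, in_project)
def pvStepA (st : List (List Char) × Bool) (line : List Char) : List (List Char) × Bool :=
  let stripped := PySem.Chars.strip line
  if PySem.Chars.startswith stripped ("[projects.".toList) then (st.1 ++ [line], true)
  else if PySem.Chars.startswith stripped (['[']) &&
          !(PySem.Chars.startswith stripped ("[projects.".toList)) then (st.1, false)
  else if st.2 then (st.1 ++ [line], st.2)
  else st

def extract_project_sections_py (content : String) : String :=
  let lines := pvSplitKeepends [] content.toList
  let res := lines.foldl pvStepA ([], false)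
  String.mk (PySem.Chars.join [] res.1)

-- ===== PORT B =====
-- the body of B's for-loop, state = (completed blocks, current block)
def pvStepB (st : List (List (List Char)) × Option (List (List Char))) (line : List Char) :
    List (List (List Char)) × Option (List (List Char)) :=
  if PySem.Chars.startswith (PySem.Chars.strip line) (['[']) then
    (st.1 ++ st.2.toList, some [line])
  else
    match st.2 with
    | some b => (st.1, some (b ++ [line]))
    | none => st

def extract_project_sections_py_alt (content : String) : String :=
  let lines := pvSplitKeepends [] content.toList
  let st := lines.foldl pvStepB ([], none)
  let blocks := st.1 ++ st.2.toList
  let kept := blocks.filter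
    (fun b => PySem.Chars.startswith (PySem.Chars.strip (b.headD [])) ("[projects.".toList))
  String.mk (PySem.Chars.join [] (kept.map (fun b => PySem.Chars.join [] b)))

-- ===== PRECONDITION & SPEC =====
def Spec_extract_project_sections_py (content : String) (out : String) : Prop := out = extract_project_sections_py_alt content
instance (content : String) (out : String) : Decidable (Spec_extract_project_sections_py content out) := by unfold Spec_extract_project_sections_py; infer_instance

-- ===== CLAIM (what is proved, stated in full; the proofs are below) =====
def Claim_equal_extract_project_sections_py : Prop := ∀ (content : String), Dom_extract_project_sections_py content → Spec_extract_project_sections_py content (extract_project_sections_py content)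

-- ===== LEMMAS AND PROOFS =====

def pvKeep (b : List (List Char)) : Bool :=
  PySem.Chars.startswith (PySem.Chars.strip (b.headD [])) ("[projects.".toList)

-- the lines A keeps, read off B's blocks
def pvKeptFlat (bs : List (List (List Char))) : List (List Char) :=
  (bs.filter pvKeep).flatten

-- invariant tying A's state to B's state
def pvInv (acc : List (List Char)) (flag : Bool)
    (done : List (List (List Char))) (cur : Option (List (List Char))) : Prop :=
  acc = pvKeptFlat (done ++ cur.toList) ∧
  (match cur with
   | none => flag = false
   | some b => ∃ h t, b = h :: t ∧ flag = pvKeep b)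

lemma pvKeptFlat_append (xs ys : List (List (List Char))) :
    pvKeptFlat (xs ++ ys) = pvKeptFlat xs ++ pvKeptFlat ys := by
  simp [pvKeptFlat, List.filter_append]

lemma pvProj_imp_hdr {s : List Char}
    (h : PySem.Chars.startswith s (['[', 'p', 'r', 'o', 'j', 'e', 'c', 't', 's', '.']) = true) :
    PySem.Chars.startswith s (['[']) = true := by
  rw [PySem.Chars.startswith_iff] at h ⊢
  exact List.IsPrefix.trans (by decide) h

lemma pvMain (lines : List (List Char)) :
    ∀ acc flag done cur, pvInv acc flag done cur →
    (lines.foldl pvStepA (acc, flag)).1 =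
      pvKeptFlat ((lines.foldl pvStepB (done, cur)).1 ++ (lines.foldl pvStepB (done, cur)).2.toList) := by
  induction lines with
  | nil =>
    intro acc flag done cur hinv
    simpa using hinv.1
  | cons l rest ih =>
    intro acc flag done cur hinv
    obtain ⟨hacc, hcur⟩ := hinv
    simp only [List.foldl_cons]
    by_cases hproj : PySem.Chars.startswith (PySem.Chars.strip l)
        (['[', 'p', 'r', 'o', 'j', 'e', 'c', 't', 's', '.']) = true
    · have hhdr := pvProj_imp_hdr hproj
      have hA : pvStepA (acc, flag) l = (acc ++ [l], true) := by
        simp [pvStepA, hproj]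
      have hB : pvStepB (done, cur) l = (done ++ cur.toList, some [l]) := by
        simp [pvStepB, hhdr]
      rw [hA, hB]
      apply ih
      constructor
      · simp [hacc, pvKeptFlat, pvKeep, hproj]
      · exact ⟨l, [], rfl, by simp [pvKeep, hproj]⟩
    · by_cases hhdr : PySem.Chars.startswith (PySem.Chars.strip l) (['[']) = true
      · have hA : pvStepA (acc, flag) l = (acc, false) := by
          simp [pvStepA, hproj, hhdr]
        have hB : pvStepB (done, cur) l = (done ++ cur.toList, some [l]) := by
          simp [pvStepB, hhdr]
        rw [hA, hB]
        apply ih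
        constructor
        · simp [hacc, pvKeptFlat, pvKeep, hproj]
        · exact ⟨l, [], rfl, by simp [pvKeep, hproj]⟩
      · -- non-header line
        cases cur with
        | none =>
          have hflag : flag = false := hcur
          have hA : pvStepA (acc, flag) l = (acc, flag) := by
            simp [pvStepA, hproj, hhdr, hflag]
          have hB : pvStepB (done, none) l = (done, none) := by
            simp [pvStepB, hhdr]
          rw [hA, hB]
          exact ih acc flag done none ⟨hacc, hflag⟩
        | some b =>
          obtain ⟨h, t, hb, hflag⟩ := hcur
          have hB : pvStepB (done, some b) l = (done, some (b ++ [l])) := by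
            simp [pvStepB, hhdr]
          by_cases hk : PySem.Chars.startswith (PySem.Chars.strip h)
              (['[', 'p', 'r', 'o', 'j', 'e', 'c', 't', 's', '.']) = true
          · have hkb : pvKeep b = true := by simp [pvKeep, hb, hk]
            have hflag' : flag = true := hflag.trans hkb
            have hA : pvStepA (acc, flag) l = (acc ++ [l], flag) := by
              simp [pvStepA, hproj, hhdr, hflag']
            rw [hA, hB]
            apply ih
            constructor
            · rw [hacc, pvKeptFlat_append, pvKeptFlat_append]
              simp [pvKeptFlat, pvKeep, hb, hk]
            · exact ⟨h, t ++ [l], by simp [hb], by simp [pvKeep, hb, hflag]⟩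
          · have hkb : pvKeep b = false := by simp [pvKeep, hb, hk]
            have hflag' : flag = false := hflag.trans hkb
            have hA : pvStepA (acc, flag) l = (acc, flag) := by
              simp [pvStepA, hproj, hhdr, hflag']
            rw [hA, hB]
            apply ih
            constructor
            · rw [hacc, pvKeptFlat_append, pvKeptFlat_append]
              simp [pvKeptFlat, pvKeep, hb, hk]
            · exact ⟨h, t ++ [l], by simp [hb], by simp [pvKeep, hb, hflag]⟩

lemma pvJoin_nil_eq_flatten (l : List (List Char)) :
    PySem.Chars.join [] l = l.flatten := by
  induction l with
  | nil => simp [PySem.Chars.join, List.intercalate]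
  | cons x xs ih =>
    cases xs <;> simp_all [PySem.Chars.join, List.intercalate, List.intersperse]

lemma pvFlatten_kept (bs : List (List (List Char))) :
    (pvKeptFlat bs).flatten =
      ((bs.filter pvKeep).map (fun b => PySem.Chars.join [] b)).flatten := by
  induction bs with
  | nil => simp [pvKeptFlat]
  | cons b rest ih =>
    by_cases hk : pvKeep b = true <;>
      simp_all [pvKeptFlat, pvJoin_nil_eq_flatten]

-- ===== VERDICT (by name: the statement is the Claim_ definition above) =====
theorem extract_project_sections_py_spec : Claim_equal_extract_project_sections_py := by
  intro content _
  unfold Spec_extract_project_sections_py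
  unfold extract_project_sections_py extract_project_sections_py_alt
  have h := pvMain (pvSplitKeepends [] content.toList) [] false [] none ⟨rfl, rfl⟩
  simp only []
  rw [h]
  rw [show (fun (b : List (List Char)) => PySem.Chars.startswith (PySem.Chars.strip (b.headD [])) ("[projects.".toList)) = pvKeep from rfl]
  congr 1
  rw [pvJoin_nil_eq_flatten, pvJoin_nil_eq_flatten]
  exact pvFlatten_kept _
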